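-- pv_equiv track=rewrite | github.com/Symbolk/AlgInPy | DP/46translate-num.py | translateNum2
-- ===== SOURCE A (Python) =====
-- def translateNum2(num: int) -> int:
--     a = b = 1
--     y = num % 10
--     while num != 0:
--         num //= 10
--         x = num % 10
--         a, b = (a + b if 10 <= x * 10 + y <= 25 else a), a
--         y = x
--     return a
-- ===== SOURCE B (Python) =====
-- def translateNum2(num: int) -> int:
--     # Naive branching recursion (no DP): at each position either take one digit,
--     # or take two digits when they form a code in 10..25.
--     digits = []
--     while num >= 10:
--         digits.append(num % 10)
--         num //= 10
--     digits.append(num)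
--     digits.reverse()
--
--     def go(i: int) -> int:
--         if i + 1 >= len(digits):
--             return 1
--         total = go(i + 1)
--         if 10 <= digits[i] * 10 + digits[i + 1] <= 25:
--             total += go(i + 2)
--         return total
--
--     return go(0)
-- ===== Notes on version B (the rewrite author's own statement) =====
-- stated objective: alternative
-- what changed: A runs a streaming two-variable dynamic program while extracting digits least-significant-first; B materializes the digit list once and counts by a naive branching recursion (take one digit, or two when the pair is in 10..25) with no DP state.
import Mathlib
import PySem

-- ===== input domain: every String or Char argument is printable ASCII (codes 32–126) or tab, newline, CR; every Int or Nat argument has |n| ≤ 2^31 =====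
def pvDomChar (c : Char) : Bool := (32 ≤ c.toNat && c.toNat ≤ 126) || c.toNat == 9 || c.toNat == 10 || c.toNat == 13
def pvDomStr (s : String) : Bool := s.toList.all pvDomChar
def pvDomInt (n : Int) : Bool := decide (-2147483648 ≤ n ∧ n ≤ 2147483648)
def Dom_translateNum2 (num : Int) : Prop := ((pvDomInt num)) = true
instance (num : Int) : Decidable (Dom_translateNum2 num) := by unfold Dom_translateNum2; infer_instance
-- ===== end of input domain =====

-- B replaces A's streaming two-variable DP by a materialized digit list followed by a naive
-- branching recursion over positions (objective: alternative algorithm — naive recursion instead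
-- of dynamic programming; Pre_ excludes negative inputs, on which A's while loop never terminates).


-- ===== PORT A =====
-- while loop of A; fuel num.natAbs is enough since the loop runs at most one step per decimal digit
def aLoop : Nat → Int → Int → Int → Int → Int
  | 0, _, a, _, _ => a
  | f + 1, num, a, b, y =>
    if num ≠ 0 then
      let num' := PySem.Int.floordiv num 10
      let x := PySem.Int.mod num' 10
      aLoop f num' (if 10 ≤ x * 10 + y ∧ x * 10 + y ≤ 25 then a + b else a) a x
    else a

def translateNum2 (num : Int) : Int :=
  aLoop num.natAbs num 1 1 (PySem.Int.mod num 10)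

-- ===== PORT B =====
-- B's while loop: collect digits least-significant-first (fuel as in A's port)
def bDigits : Nat → Int → List Int → List Int
  | 0, num, ds => ds ++ [num]
  | f + 1, num, ds =>
    if 10 ≤ num then
      bDigits f (PySem.Int.floordiv num 10) (ds ++ [PySem.Int.mod num 10])
    else ds ++ [num]

-- B's inner recursive function go(i); indices i, i+1 are in range whenever they are read,
-- so List.getD is exact for Python's digits[i] here
def bGo (ds : List Int) (i : Nat) : Int :=
  if ds.length ≤ i + 1 then 1
  else
    bGo ds (i + 1) +
      (if 10 ≤ ds.getD i 0 * 10 + ds.getD (i + 1) 0 ∧ ds.getD i 0 * 10 + ds.getD (i + 1) 0 ≤ 25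
       then bGo ds (i + 2) else 0)
termination_by ds.length - i

def translateNum2_alt (num : Int) : Int :=
  bGo (bDigits num.natAbs num []).reverse 0

-- ===== PRECONDITION & SPEC =====
-- Pre_ excludes exactly the negative inputs, on which A's while loop never terminates
-- (num //= 10 stays at -1); B still terminates there.
def Pre_translateNum2 (num : Int) : Prop := 0 ≤ num
instance (num : Int) : Decidable (Pre_translateNum2 num) := by unfold Pre_translateNum2; infer_instance
def pvWitness_translateNum2 : Int := 12258

def Spec_translateNum2 (num : Int) (out : Int) : Prop := out = translateNum2_alt num
instance (num : Int) (out : Int) : Decidable (Spec_translateNum2 num out) := by unfold Spec_translateNum2; infer_instance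

-- ===== CLAIM (what is proved, stated in full; the proofs are below) =====
def Claim_equal_translateNum2 : Prop := ∀ (num : Int), Dom_translateNum2 num → Pre_translateNum2 num → Spec_translateNum2 num (translateNum2 num)

-- ===== LEMMAS AND PROOFS =====

-- number of ways to group a digit list into 1- and 2-digit codes (2-digit codes must be 10..25)
def ways : List Int → Int
  | [] => 1
  | [_] => 1
  | x :: y :: tl => ways (y :: tl) + (if 10 ≤ x * 10 + y ∧ x * 10 + y ≤ 25 then ways tl else 0)

-- decimal digits of n, most significant first (empty for 0)
def digs (n : Nat) : List Int :=
  if h : n = 0 then [] else digs (n / 10) ++ [((n % 10 : Nat) : Int)]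
decreasing_by exact Nat.div_lt_self (Nat.pos_of_ne_zero h) (by norm_num)

lemma digs_zero : digs 0 = [] := by rw [digs]; simp

lemma digs_ne {n : Nat} (h : n ≠ 0) : digs n = digs (n / 10) ++ [((n % 10 : Nat) : Int)] := by
  rw [digs]; simp [h]

-- A's loop computes ways of the remaining digits prepended to the processed suffix
lemma aLoop_eq (f : Nat) : ∀ (n : Nat) (S : List Int), n < 10 ^ f →
    aLoop f (n : Int) (ways (((n % 10 : Nat) : Int) :: S)) (ways S) ((n % 10 : Nat) : Int)
      = ways (digs (n / 10) ++ ((n % 10 : Nat) : Int) :: S) := by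
  induction f with
  | zero =>
    intro n S h
    interval_cases n
    simp [aLoop, digs_zero]
  | succ f ih =>
    intro n S h
    by_cases hn : n = 0
    · subst hn; simp [aLoop, digs_zero]
    · have hcast : ((n : Int) ≠ 0) := by exact_mod_cast hn
      rw [aLoop]
      simp only [hcast, if_pos, ne_eq, not_false_eq_true, if_true]
      have hfd : PySem.Int.floordiv (n : Int) 10 = ((n / 10 : Nat) : Int) := by
        exact_mod_cast PySem.Int.floordiv_natCast n 10
      have hmd : PySem.Int.mod ((n / 10 : Nat) : Int) 10 = ((n / 10 % 10 : Nat) : Int) := by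
        exact_mod_cast PySem.Int.mod_natCast (n / 10) 10
      rw [hfd, hmd]
      have ha : (if 10 ≤ ((n / 10 % 10 : Nat) : Int) * 10 + ((n % 10 : Nat) : Int)
              ∧ ((n / 10 % 10 : Nat) : Int) * 10 + ((n % 10 : Nat) : Int) ≤ 25
            then ways (((n % 10 : Nat) : Int) :: S) + ways S
            else ways (((n % 10 : Nat) : Int) :: S))
          = ways (((n / 10 % 10 : Nat) : Int) :: ((n % 10 : Nat) : Int) :: S) := by
        rw [ways]; split_ifs <;> ring
      rw [ha]
      have hlt : n / 10 < 10 ^ f := by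
        rw [Nat.div_lt_iff_lt_mul (by norm_num)]
        calc n < 10 ^ (f + 1) := h
          _ = 10 ^ f * 10 := by ring
      have := ih (n / 10) (((n % 10 : Nat) : Int) :: S) hlt
      rw [this]
      by_cases h10 : n / 10 = 0
      · rw [h10]
        simp only [Nat.zero_div, Nat.zero_mod, digs_zero, List.nil_append, Nat.cast_zero]
        rw [ways]
        have : ¬ (10 ≤ (0 : Int) * 10 + ((n % 10 : Nat) : Int)
            ∧ (0 : Int) * 10 + ((n % 10 : Nat) : Int) ≤ 25) := by
          have : n % 10 < 10 := Nat.mod_lt _ (by norm_num)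
          push_neg
          intro hc
          omega
        rw [if_neg this]
        ring
      · rw [digs_ne h10, List.append_assoc]
        simp

-- B's while loop produces the digits of n least-significant-first (appended to ds)
lemma bDigits_eq (f : Nat) : ∀ (n : Nat) (ds : List Int), n < 10 ^ f →
    bDigits f (n : Int) ds = ds ++ (digs (n / 10) ++ [((n % 10 : Nat) : Int)]).reverse := by
  induction f with
  | zero =>
    intro n ds h
    interval_cases n
    simp [bDigits, digs_zero]
  | succ f ih =>
    intro n ds h
    rw [bDigits]
    by_cases h10 : 10 ≤ n
    · have hc : (10 : Int) ≤ (n : Int) := by exact_mod_cast h10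
      rw [if_pos hc]
      have hfd : PySem.Int.floordiv (n : Int) 10 = ((n / 10 : Nat) : Int) := by
        exact_mod_cast PySem.Int.floordiv_natCast n 10
      have hmd : PySem.Int.mod (n : Int) 10 = ((n % 10 : Nat) : Int) := by
        exact_mod_cast PySem.Int.mod_natCast n 10
      rw [hfd, hmd]
      have hlt : n / 10 < 10 ^ f := by
        rw [Nat.div_lt_iff_lt_mul (by norm_num)]
        calc n < 10 ^ (f + 1) := h
          _ = 10 ^ f * 10 := by ring
      rw [ih (n / 10) _ hlt]
      have hne : n / 10 ≠ 0 := by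
        have : 1 ≤ n / 10 := (Nat.le_div_iff_mul_le (by norm_num)).2 (by omega)
        omega
      rw [digs_ne hne]
      simp [List.append_assoc]
    · have hc : ¬ (10 : Int) ≤ (n : Int) := by exact_mod_cast h10
      rw [if_neg hc]
      have h0 : n / 10 = 0 := Nat.div_eq_of_lt (by omega)
      have hm : n % 10 = n := Nat.mod_eq_of_lt (by omega)
      rw [h0, hm, digs_zero]
      simp

-- B's recursion from position i computes ways of the suffix starting at i
lemma bGo_eq (ds : List Int) : ∀ (i : Nat), bGo ds i = ways (ds.drop i) := by
  intro i
  induction hk : ds.length - i using Nat.strong_induction_on generalizing i with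
  | _ k ih =>
    rw [bGo]
    by_cases hlen : ds.length ≤ i + 1
    · rw [if_pos hlen]
      have : (ds.drop i).length ≤ 1 := by simp; omega
      match hd : ds.drop i with
      | [] => simp [ways]
      | [x] => simp [ways]
      | x :: y :: tl => rw [hd] at this; simp at this
    · rw [if_neg hlen]
      push_neg at hlen
      have h1 : i < ds.length := by omega
      have h2 : i + 1 < ds.length := by omega
      have hd1 : ds.drop i = ds[i] :: ds.drop (i + 1) := List.drop_eq_getElem_cons h1
      have hd2 : ds.drop (i + 1) = ds[i + 1] :: ds.drop (i + 2) := List.drop_eq_getElem_cons h2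
      have hg1 : ds.getD i 0 = ds[i] := List.getD_eq_getElem ds 0 h1
      have hg2 : ds.getD (i + 1) 0 = ds[i + 1] := List.getD_eq_getElem ds 0 h2
      have ihk1 : bGo ds (i + 1) = ways (ds.drop (i + 1)) :=
        ih (ds.length - (i + 1)) (by omega) (i + 1) rfl
      have ihk2 : bGo ds (i + 2) = ways (ds.drop (i + 2)) :=
        ih (ds.length - (i + 2)) (by omega) (i + 2) rfl
      rw [hg1, hg2, ihk1, ihk2, hd1, hd2, ways]

lemma natAbs_lt_pow (n : Nat) : n < 10 ^ n := by
  calc n < 2 ^ n := Nat.lt_two_pow_self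
    _ ≤ 10 ^ n := Nat.pow_le_pow_left (by norm_num) n

-- ===== VERDICT (by name: the statement is the Claim_ definition above) =====
theorem translateNum2_spec : Claim_equal_translateNum2 := by
  intro num _ hpre
  unfold Spec_translateNum2 translateNum2 translateNum2_alt
  obtain ⟨n, rfl⟩ : ∃ n : Nat, num = (n : Int) := ⟨num.toNat, (Int.toNat_of_nonneg hpre).symm⟩
  have hfuel : n < 10 ^ n := natAbs_lt_pow n
  have hA : aLoop ((n : Int)).natAbs (n : Int) 1 1 (PySem.Int.mod (n : Int) 10)
      = ways (digs (n / 10) ++ [((n % 10 : Nat) : Int)]) := by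
    have hmd : PySem.Int.mod (n : Int) 10 = ((n % 10 : Nat) : Int) := by
      exact_mod_cast PySem.Int.mod_natCast n 10
    rw [Int.natAbs_natCast, hmd]
    have := aLoop_eq n n [] hfuel
    simpa [ways] using this
  have hB : (bDigits ((n : Int)).natAbs (n : Int) []).reverse
      = digs (n / 10) ++ [((n % 10 : Nat) : Int)] := by
    rw [Int.natAbs_natCast, bDigits_eq n n [] hfuel]
    simp
  rw [hA, hB, bGo_eq, List.drop_zero]
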